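-- pv_equiv track=rewrite | github.com/jenul-ferdinand/algorithms | fit3155/wk05/src/flc.py | flc_decode
-- ===== SOURCE A (Python) =====
-- def bin_to_int(byte: str) -> int:
--     m = len(byte)
--     weights = [2**i for i in reversed(range(m))]
--     bits = [int(b) for b in byte]
--
--     nums = []
--     for j in range(m):
--         nums.append(bits[j] * weights[j])
--
--     return sum(nums)
--
-- def flc_decode(code: str, bit_width: int = 8):
--     n = len(code)
--     bins = []
--     for i in range(0, n, bit_width + 1):
--         binary = code[i : i + bit_width + 1]
--         bins.append(binary)
--
--     ords = []
--     for bin in bins: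
--         num = bin_to_int(bin)
--         ords.append(num)
--
--     encoded = ""
--     for o in ords:
--         c = chr(o)
--         encoded = encoded + c
--
--     return encoded
-- ===== SOURCE B (Python) =====
-- def flc_decode(code: str, bit_width: int = 8):
--     step = bit_width + 1
--     chars = []
--     for i in range(0, len(code), step):
--         acc = 0
--         for b in code[i : i + step]:
--             acc = acc * 2 + int(b)
--         chars.append(chr(acc))
--     return "".join(chars)
-- ===== Notes on version B (the rewrite author's own statement) =====
-- stated objective: simpler
-- what changed: Replaces A's per-chunk weight list, bit list, product list and sum plus a final string-concatenation loop by a single streaming Horner accumulator (acc = acc*2 + int(b)) per chunk, collecting the characters and joining them at the end.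
import Mathlib
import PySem

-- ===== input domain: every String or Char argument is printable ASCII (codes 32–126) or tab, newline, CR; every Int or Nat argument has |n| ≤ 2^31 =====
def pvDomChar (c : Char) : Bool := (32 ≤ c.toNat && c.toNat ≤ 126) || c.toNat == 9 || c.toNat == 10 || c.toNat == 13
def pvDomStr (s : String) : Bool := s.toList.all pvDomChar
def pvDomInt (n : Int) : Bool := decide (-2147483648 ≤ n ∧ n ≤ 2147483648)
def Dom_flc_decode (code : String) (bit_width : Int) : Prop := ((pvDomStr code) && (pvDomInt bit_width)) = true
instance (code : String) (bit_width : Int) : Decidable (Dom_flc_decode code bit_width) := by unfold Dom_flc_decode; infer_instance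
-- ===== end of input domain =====

-- B replaces A's three passes (weights list + per-bit products + sum, then a string-concat loop)
-- by one streaming Horner accumulator per chunk; objective: simpler.

-- int(b) for a single character b; Pre_ restricts to digit characters, where this is exact.
def pvDigit (b : Char) : Int := (PySem.Int.ofChars? [b]).getD 0

-- ===== PORT A =====
def pvBinToInt (byte : List Char) : Int :=
  let m := byte.length
  let weights : List Int := ((List.range m).reverse).map (fun i => (2:Int) ^ i)
  let bits : List Int := byte.map pvDigit
  let nums : List Int :=
    (PySem.List.pyRange 0 (m : Int) 1).foldl
      (fun acc j => acc ++ [PySem.List.pyGetD bits j 0 * PySem.List.pyGetD weights j 0]) []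
  nums.sum

def flc_decode (code : String) (bit_width : Int) : String :=
  let cs := code.toList
  let n : Int := cs.length
  let bins : List (List Char) :=
    (PySem.List.pyRange 0 n (bit_width + 1)).foldl
      (fun acc i => acc ++ [PySem.List.slice cs (some i) (some (i + bit_width + 1))]) []
  let ords : List Int := bins.foldl (fun acc b => acc ++ [pvBinToInt b]) []
  -- chr(o): exact on Pre_, which keeps every decoded value a valid Unicode scalar
  let encoded : List Char := ords.foldl (fun acc o => acc ++ [Char.ofNat o.toNat]) []
  String.ofList encoded

-- ===== PORT B =====
def flc_decode_alt (code : String) (bit_width : Int) : String :=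
  let cs := code.toList
  let step := bit_width + 1
  let chars : List Char :=
    (PySem.List.pyRange 0 (cs.length : Int) step).foldl
      (fun acc i =>
        let chunk := PySem.List.slice cs (some i) (some (i + step))
        let v := chunk.foldl (fun a b => a * 2 + pvDigit b) 0
        acc ++ [Char.ofNat v.toNat]) []
  String.ofList chars

-- ===== PRECONDITION & SPEC =====

-- helpers for Pre_ only: the integer a digit chunk denotes, and the chunks of width w+1
def pvCodeVal : List Char → Int
  | [] => 0
  | c :: t => ((c.toNat : Int) - 48) * 2 ^ t.length + pvCodeVal t

def pvChunksAux : Nat → List Char → Nat → List (List Char)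
  | 0, _, _ => []
  | _, [], _ => []
  | n + 1, c :: t, w => (c :: t).take (w + 1) :: pvChunksAux n (t.drop w) w

def pvChunks (cs : List Char) (w : Nat) : List (List Char) := pvChunksAux cs.length cs w

-- Pre_ excludes exactly: any non-digit character or bit_width = -1 (A raises ValueError there),
-- a chunk denoting a value above 0x10FFFF (chr raises ValueError), and a chunk denoting a value in
-- the surrogate range 0xD800–0xDFFF, where A returns a lone-surrogate string that Lean's String
-- type cannot represent.  For bit_width ≤ -2 the range is empty and A returns "" for any code.
def Pre_flc_decode (code : String) (bit_width : Int) : Prop :=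
  bit_width ≤ -2 ∨
    (0 ≤ bit_width ∧
      code.toList.all (fun c => decide ('0' ≤ c ∧ c ≤ '9')) = true ∧
      (pvChunks code.toList bit_width.toNat).all
        (fun b => decide (pvCodeVal b < 0xD800 ∨ (0xE000 ≤ pvCodeVal b ∧ pvCodeVal b ≤ 0x10FFFF))) = true)
instance (code : String) (bit_width : Int) : Decidable (Pre_flc_decode code bit_width) := by
  unfold Pre_flc_decode; infer_instance

def pvWitness_flc_decode : String × Int := ("0100000101000010", 7)

def Spec_flc_decode (code : String) (bit_width : Int) (out : String) : Prop := out = flc_decode_alt code bit_width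
instance (code : String) (bit_width : Int) (out : String) : Decidable (Spec_flc_decode code bit_width out) := by unfold Spec_flc_decode; infer_instance

-- ===== CLAIM (what is proved, stated in full; the proofs are below) =====
def Claim_equal_flc_decode : Prop := ∀ (code : String) (bit_width : Int), Dom_flc_decode code bit_width → Pre_flc_decode code bit_width → Spec_flc_decode code bit_width (flc_decode code bit_width)

-- ===== LEMMAS AND PROOFS =====

-- recursive value of a digit string, the common meeting point of the two ports
def pvVal : List Char → Int
  | [] => 0
  | c :: t => pvDigit c * 2 ^ t.length + pvVal t

lemma horner_shift (bs : List Char) : ∀ a : Int,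
    bs.foldl (fun x b => x * 2 + pvDigit b) a = a * 2 ^ bs.length + pvVal bs := by
  induction bs with
  | nil => intro a; simp [pvVal]
  | cons c t ih =>
      intro a
      simp only [List.foldl_cons, ih, pvVal, List.length_cons]
      ring

lemma horner_eq_val (bs : List Char) :
    bs.foldl (fun x b => x * 2 + pvDigit b) 0 = pvVal bs := by
  simpa using horner_shift bs 0

lemma binToInt_sum (bs : List Char) :
    pvBinToInt bs =
      ((List.range bs.length).map
        (fun k => pvDigit (bs.getD k ' ') * 2 ^ (bs.length - 1 - k))).sum := by
  unfold pvBinToInt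
  simp only [PySem.List.foldl_append_singleton_eq_map, List.nil_append,
    PySem.List.pyRange_zero_natCast]
  rw [List.map_map]
  congr 1
  apply List.map_congr_left
  intro k hk
  have hk' : k < bs.length := List.mem_range.mp hk
  simp only [Function.comp_apply]
  rw [PySem.List.pyGetD_natCast, PySem.List.pyGetD_natCast]
  congr 1
  · rw [List.getD_eq_getElem?_getD, List.getElem?_map]
    simp [hk']
  · rw [List.getD_eq_getElem?_getD]
    rw [List.getElem?_map]
    have hrev : ((List.range bs.length).reverse)[k]? = some (bs.length - 1 - k) := by
      rw [List.getElem?_reverse (by simpa using hk')]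
      simp only [List.length_range]
      rw [List.getElem?_range (by omega)]
    simp [hrev]

lemma binToInt_eq_val (bs : List Char) : pvBinToInt bs = pvVal bs := by
  rw [binToInt_sum]
  induction bs with
  | nil => simp [pvVal]
  | cons c t ih =>
      rw [pvVal, ← ih, List.length_cons, List.range_succ_eq_map,
        List.map_cons, List.sum_cons, List.map_map]
      congr 1
      apply congrArg
      apply List.map_congr_left
      intro k hk
      have hk' : k < t.length := List.mem_range.mp hk
      simp only [Function.comp_apply, List.getD_cons_succ]
      congr 2
      omega

-- A's chained loops collapse to one map over the chunk starts
lemma flc_decode_eq_map (code : String) (bit_width : Int) :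
    flc_decode code bit_width =
      String.ofList ((PySem.List.pyRange 0 (code.toList.length : Int) (bit_width + 1)).map
        (fun i => Char.ofNat (pvBinToInt
          (PySem.List.slice code.toList (some i) (some (i + bit_width + 1)))).toNat)) := by
  unfold flc_decode
  simp only [PySem.List.foldl_append_singleton_eq_map, List.nil_append, List.map_map]
  rfl

lemma flc_decode_alt_eq_map (code : String) (bit_width : Int) :
    flc_decode_alt code bit_width =
      String.ofList ((PySem.List.pyRange 0 (code.toList.length : Int) (bit_width + 1)).map
        (fun i => Char.ofNat
          ((PySem.List.slice code.toList (some i) (some (i + bit_width + 1))).foldl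
            (fun a b => a * 2 + pvDigit b) 0).toNat)) := by
  unfold flc_decode_alt
  simp only [PySem.List.foldl_append_singleton_eq_map, List.nil_append]
  congr 1
  apply List.map_congr_left
  intro i _
  congr 2
  ring_nf

-- ===== VERDICT (by name: the statement is the Claim_ definition above) =====
theorem flc_decode_spec : Claim_equal_flc_decode := by
  intro code bit_width _ _
  unfold Spec_flc_decode
  rw [flc_decode_eq_map, flc_decode_alt_eq_map]
  congr 1
  apply List.map_congr_left
  intro i _
  rw [horner_eq_val, binToInt_eq_val]
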